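-- pv_equiv track=rewrite | github.com/yangzongwu/leetcode | leetcode2/0447. Number of Boomerangs.py | subnumberOfBoomerangs
-- ===== SOURCE A (Python) =====
-- def subnumberOfBoomerangs(point,points):
--     rep=0
--
--     dictpoints={}
--     for p in points:
--         k=(p[0]-point[0])**2+(p[1]-point[1])**2
--         if k not in dictpoints:
--             dictpoints[k]=1
--         else:
--             dictpoints[k]+=1
--
--     for key in dictpoints:
--         if dictpoints[key]>1:
--             rep+=dictpoints[key]*(dictpoints[key]-1)
--
--     return rep
-- ===== SOURCE B (Python) =====
-- def subnumberOfBoomerangs(point, points):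
--     # Single pass: when a distance key reaches count c+1, the number of ordered
--     # pairs in that bucket grows by 2*c, so accumulate incrementally.
--     counts = {}
--     rep = 0
--     for p in points:
--         k = (p[0] - point[0]) ** 2 + (p[1] - point[1]) ** 2
--         c = counts.get(k, 0)
--         rep += 2 * c
--         counts[k] = c + 1
--     return rep
-- ===== Notes on version B (the rewrite author's own statement) =====
-- stated objective: alternative
-- what changed: B merges A's two phases into one pass: instead of building a distance-count dict and then summing c*(c-1) over it in a second loop, B accumulates the total incrementally (adding 2*(current count) before each increment), so no second loop over the dict exists.
import Mathlib
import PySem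

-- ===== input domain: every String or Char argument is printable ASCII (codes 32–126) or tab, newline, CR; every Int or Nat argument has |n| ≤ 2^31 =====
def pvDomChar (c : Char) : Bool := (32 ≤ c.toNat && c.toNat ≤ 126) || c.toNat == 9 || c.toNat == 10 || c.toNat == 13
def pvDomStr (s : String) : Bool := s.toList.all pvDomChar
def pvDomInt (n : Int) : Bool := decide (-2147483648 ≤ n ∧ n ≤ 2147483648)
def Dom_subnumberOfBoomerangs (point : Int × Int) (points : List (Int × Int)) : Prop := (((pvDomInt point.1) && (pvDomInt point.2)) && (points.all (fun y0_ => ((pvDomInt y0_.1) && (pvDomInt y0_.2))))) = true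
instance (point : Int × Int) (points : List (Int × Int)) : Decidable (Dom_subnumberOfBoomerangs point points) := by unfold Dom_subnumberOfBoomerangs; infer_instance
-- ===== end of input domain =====

-- B merges A's two phases (count dict, then sum c*(c-1) over it) into one pass that
-- adds 2*(current count) per point; same result, no second loop (objective: alternative).

-- ===== PORT A =====
def subnumberOfBoomerangs (point : Int × Int) (points : List (Int × Int)) : Int :=
  let dictpoints : PySem.Dict Int Int :=
    points.foldl (fun d p =>
      let k := (p.1 - point.1) ^ 2 + (p.2 - point.2) ^ 2
      if d.contains k = false then d.insert k 1
      else d.insert k (d.getD k 0 + 1)) PySem.Dict.empty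
  dictpoints.keys.foldl (fun rep key =>
    if dictpoints.getD key 0 > 1 then rep + dictpoints.getD key 0 * (dictpoints.getD key 0 - 1)
    else rep) 0

-- ===== PORT B =====
def subnumberOfBoomerangs_alt (point : Int × Int) (points : List (Int × Int)) : Int :=
  (points.foldl (fun (s : PySem.Dict Int Int × Int) p =>
    let k := (p.1 - point.1) ^ 2 + (p.2 - point.2) ^ 2
    let c := s.1.getD k 0
    (s.1.insert k (c + 1), s.2 + 2 * c)) (PySem.Dict.empty, 0)).2

-- ===== PRECONDITION & SPEC =====
def Spec_subnumberOfBoomerangs (point : Int × Int) (points : List (Int × Int)) (out : Int) : Prop := out = subnumberOfBoomerangs_alt point points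
instance (point : Int × Int) (points : List (Int × Int)) (out : Int) : Decidable (Spec_subnumberOfBoomerangs point points out) := by unfold Spec_subnumberOfBoomerangs; infer_instance

-- ===== CLAIM (what is proved, stated in full; the proofs are below) =====
def Claim_equal_subnumberOfBoomerangs : Prop := ∀ (point : Int × Int) (points : List (Int × Int)), Dom_subnumberOfBoomerangs point points → Spec_subnumberOfBoomerangs point points (subnumberOfBoomerangs point points)

-- ===== LEMMAS AND PROOFS =====

/-- Contribution of a bucket of count `c` (A's `if` makes the `c ≤ 1` case 0). -/
def pvBoom (c : Int) : Int := if c > 1 then c * (c - 1) else 0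

/-- The common value: sum of `pvBoom (count k)` over the distinct keys of `l`. -/
def pvS (l : List Int) : Int :=
  ((PySem.Set.ofList l).map (fun k => pvBoom ((l.count k : Int)))).sum

theorem pvSum_congr_single (l : List Int) (g g' : Int → Int) (k : Int)
    (hnd : l.Nodup) (hk : k ∈ l) (hcong : ∀ j, j ≠ k → g' j = g j) :
    (l.map g').sum = (l.map g).sum + (g' k - g k) := by
  induction l with
  | nil => cases hk
  | cons x xs ih =>
    rcases List.mem_cons.mp hk with h | h
    · subst h
      have hrest : ∀ j ∈ xs, g' j = g j := by
        intro j hj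
        exact hcong j (fun hjk => (List.nodup_cons.mp hnd).1 (hjk ▸ hj))
      have : xs.map g' = xs.map g := List.map_congr_left hrest
      simp [this]; ring
    · have hx : x ≠ k := fun hxk => (List.nodup_cons.mp hnd).1 (hxk ▸ h)
      have := ih (List.nodup_cons.mp hnd).2 h
      simp [hcong x hx, this]; ring

theorem pvBoom_step (c : Int) (hc : 1 ≤ c) : pvBoom (c + 1) = pvBoom c + 2 * c := by
  unfold pvBoom
  rcases lt_or_ge 1 c with h | h
  · rw [if_pos (by omega), if_pos h]; ring
  · have : c = 1 := le_antisymm h hc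
    subst this; norm_num

theorem pvS_append_singleton (l : List Int) (k : Int) :
    pvS (l ++ [k]) = pvS l + 2 * l.count k := by
  unfold pvS
  rw [PySem.Set.ofList_append_singleton]
  by_cases hk : k ∈ PySem.Set.ofList l
  · have hkl : k ∈ l := (PySem.Set.mem_ofList l k).mp hk
    rw [PySem.Set.add_of_mem hk]
    have hcnt : ∀ j : Int, j ≠ k → (((l ++ [k]).count j : Int)) = ((l.count j : Int)) := by
      intro j hj
      have h0 : [k].count j = 0 := List.count_eq_zero.mpr (by simp [hj])
      rw [List.count_append, h0]
      push_cast; ring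
    have h1 : (1 : Int) ≤ (l.count k : Int) := by
      exact_mod_cast List.count_pos_iff.mpr hkl
    have hrw := pvSum_congr_single (PySem.Set.ofList l)
      (fun j => pvBoom ((l.count j : Int))) (fun j => pvBoom (((l ++ [k]).count j : Int))) k
      (PySem.Set.nodup_ofList l) hk
      (fun j hj => by
        show pvBoom (((l ++ [k]).count j : Int)) = pvBoom ((l.count j : Int))
        rw [hcnt j hj])
    rw [hrw]
    have hckn : (l ++ [k]).count k = l.count k + 1 := by
      rw [List.count_append]; simp
    have hck : (((l ++ [k]).count k : Int)) = ((l.count k : Int)) + 1 := by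
      rw [hckn]; push_cast; ring
    show (List.map (fun j => pvBoom ((l.count j : Int))) (PySem.Set.ofList l)).sum +
        (pvBoom (((l ++ [k]).count k : Int)) - pvBoom ((l.count k : Int)))
      = (List.map (fun j => pvBoom ((l.count j : Int))) (PySem.Set.ofList l)).sum + 2 * (l.count k : Int)
    rw [hck, pvBoom_step _ h1]; ring
  · have hkl : k ∉ l := fun h => hk ((PySem.Set.mem_ofList l k).mpr h)
    rw [PySem.Set.add_of_not_mem hk, List.map_append, List.sum_append]
    have hmap : (PySem.Set.ofList l).map (fun j => pvBoom (((l ++ [k]).count j : Int)))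
        = (PySem.Set.ofList l).map (fun j => pvBoom ((l.count j : Int))) := by
      refine List.map_congr_left (fun j hj => ?_)
      have hjk : j ≠ k := fun hjk => hkl (hjk ▸ (PySem.Set.mem_ofList l j).mp hj)
      have h0 : [k].count j = 0 := List.count_eq_zero.mpr (by simp [hjk])
      show pvBoom (((l ++ [k]).count j : Int)) = pvBoom ((l.count j : Int))
      rw [List.count_append, h0]
      norm_num
    have hckn : (l ++ [k]).count k = 1 := by
      rw [List.count_append, List.count_eq_zero.mpr hkl]; simp
    have hc0 : l.count k = 0 := List.count_eq_zero.mpr hkl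
    rw [hmap]
    simp [hc0, pvBoom]

/-- A's dict-building step equals the uniform insert-form. -/
theorem pvA_step (d : PySem.Dict Int Int) (k : Int) :
    (if d.contains k = false then d.insert k 1 else d.insert k (d.getD k 0 + 1))
      = d.insert k (d.getD k 0 + 1) := by
  by_cases h : d.contains k = false
  · rw [if_pos h]
    have h0 : d.getD k 0 = 0 := by simp [PySem.Dict.getD_of_not_contains, h]
    rw [h0]; norm_num
  · rw [if_neg h]

/-- A's aggregation loop is `r +` the sum of `pvBoom ∘ h` over the list. -/
theorem pvAgg (l : List Int) (h : Int → Int) (r : Int) :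
    l.foldl (fun rep j => if h j > 1 then rep + h j * (h j - 1) else rep) r
      = r + (l.map (fun j => pvBoom (h j))).sum := by
  induction l generalizing r with
  | nil => simp
  | cons x xs ih =>
    simp only [List.foldl_cons, List.map_cons, List.sum_cons, ih]
    unfold pvBoom
    by_cases hx : h x > 1
    · rw [if_pos hx, if_pos hx]; ring
    · rw [if_neg hx, if_neg hx]; ring

/-- B's loop invariant: starting from `counter pre` with rep `pvS pre`. -/
theorem pvB_inv (ks : List Int) : ∀ (pre : List Int),
    (ks.foldl (fun (s : PySem.Dict Int Int × Int) k =>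
        (s.1.insert k (s.1.getD k 0 + 1), s.2 + 2 * s.1.getD k 0))
      (PySem.Dict.counter pre, pvS pre)).2 = pvS (pre ++ ks) := by
  induction ks with
  | nil => intro pre; simp
  | cons k ks ih =>
    intro pre
    have hdict : (PySem.Dict.counter pre).insert k ((PySem.Dict.counter pre).getD k 0 + 1)
        = PySem.Dict.counter (pre ++ [k]) := by
      rw [← PySem.Dict.foldl_insert_getD_add_one_eq_counter (pre ++ [k]),
          ← PySem.Dict.foldl_insert_getD_add_one_eq_counter pre, List.foldl_append]
      simp
    have hrep : pvS pre + 2 * (PySem.Dict.counter pre).getD k 0 = pvS (pre ++ [k]) := by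
      rw [PySem.Dict.getD_counter, pvS_append_singleton]
    simp only [List.foldl_cons, hdict, hrep]
    rw [ih (pre ++ [k])]
    simp

/-- The two ports agree for any key function. -/
theorem pv_main (key : Int × Int → Int) (points : List (Int × Int))
    (D : PySem.Dict Int Int)
    (hD : D = points.foldl (fun d p =>
      if d.contains (key p) = false then d.insert (key p) 1
      else d.insert (key p) (d.getD (key p) 0 + 1)) PySem.Dict.empty) :
    D.keys.foldl (fun rep j =>
        if D.getD j 0 > 1 then rep + D.getD j 0 * (D.getD j 0 - 1) else rep) 0
      = (points.foldl (fun (s : PySem.Dict Int Int × Int) p =>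
          (s.1.insert (key p) (s.1.getD (key p) 0 + 1),
           s.2 + 2 * s.1.getD (key p) 0)) (PySem.Dict.empty, 0)).2 := by
  have hAdict : D = PySem.Dict.counter (points.map key) := by
    rw [hD]
    have h1 : points.foldl (fun (d : PySem.Dict Int Int) p =>
        if d.contains (key p) = false then d.insert (key p) 1
        else d.insert (key p) (d.getD (key p) 0 + 1)) PySem.Dict.empty
        = points.foldl (fun (d : PySem.Dict Int Int) p => d.insert (key p) (d.getD (key p) 0 + 1)) PySem.Dict.empty :=
      PySem.List.foldl_congr_mem points
        (fun (d : PySem.Dict Int Int) p =>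
          if d.contains (key p) = false then d.insert (key p) 1
          else d.insert (key p) (d.getD (key p) 0 + 1))
        (fun (d : PySem.Dict Int Int) p => d.insert (key p) (d.getD (key p) 0 + 1))
        PySem.Dict.empty (fun acc p _ => pvA_step acc (key p))
    have h2 : points.foldl (fun (d : PySem.Dict Int Int) p => d.insert (key p) (d.getD (key p) 0 + 1)) PySem.Dict.empty
        = (points.map key).foldl (fun (d : PySem.Dict Int Int) x => d.insert x (d.getD x 0 + 1)) PySem.Dict.empty := by
      rw [List.foldl_map]
    rw [h1, h2, PySem.Dict.foldl_insert_getD_add_one_eq_counter]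
  subst hAdict
  calc (PySem.Dict.counter (points.map key)).keys.foldl (fun rep j =>
          if (PySem.Dict.counter (points.map key)).getD j 0 > 1 then
            rep + (PySem.Dict.counter (points.map key)).getD j 0 *
              ((PySem.Dict.counter (points.map key)).getD j 0 - 1)
          else rep) 0
      = 0 + ((PySem.Dict.counter (points.map key)).keys.map
          (fun j => pvBoom ((PySem.Dict.counter (points.map key)).getD j 0))).sum :=
        pvAgg _ _ 0
    _ = pvS (points.map key) := by
        rw [PySem.Dict.keys_counter, zero_add]
        unfold pvS
        refine congrArg List.sum (List.map_congr_left (fun j _ => ?_))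
        show pvBoom ((PySem.Dict.counter (points.map key)).getD j 0)
          = pvBoom (((points.map key).count j : Int))
        rw [PySem.Dict.getD_counter]
    _ = ((points.map key).foldl (fun (s : PySem.Dict Int Int × Int) k =>
          (s.1.insert k (s.1.getD k 0 + 1), s.2 + 2 * s.1.getD k 0))
          (PySem.Dict.empty, 0)).2 := (pvB_inv (points.map key) []).symm
    _ = (points.foldl (fun (s : PySem.Dict Int Int × Int) p =>
          (s.1.insert (key p) (s.1.getD (key p) 0 + 1),
           s.2 + 2 * s.1.getD (key p) 0)) (PySem.Dict.empty, 0)).2 := by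
        rw [List.foldl_map]

-- ===== VERDICT (by name: the statement is the Claim_ definition above) =====
theorem subnumberOfBoomerangs_spec : Claim_equal_subnumberOfBoomerangs := by
  intro point points _
  unfold Spec_subnumberOfBoomerangs subnumberOfBoomerangs subnumberOfBoomerangs_alt
  exact pv_main (fun p => (p.1 - point.1) ^ 2 + (p.2 - point.2) ^ 2) points _ rfl
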